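-- pv_equiv track=rewrite | github.com/zroumane/MPSI | python/mpsi/S1/tp6.py | q1
-- ===== SOURCE A (Python) =====
-- def q1(s):
--     l1 = s[0]
--     l2 = ".." + s[1]
--     l3 = "...." + s[2]
--     for i in range(3, len(s)):
--         if i % 4 == 0:
--             l1 += "......." + s[i]
--         elif i % 2 == 1:
--             l2 += "..." + s[i]
--         elif i % 2 == 0:
--             l3 += "......." + s[i]
--     return l1 + "\n" + l2 + "\n" + l3
-- ===== SOURCE B (Python) =====
-- def q1(s):
--     def go(rest):
--         # rest = s[k:] with k % 4 == 3; returns the three line suffixes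
--         if not rest:
--             return ("", "", "")
--         chunk, tail = rest[:4], rest[4:]
--         a, b, c = go(tail)
--         a = ("......." + chunk[1] if len(chunk) > 1 else "") + a
--         b = "..." + chunk[0] + ("..." + chunk[2] if len(chunk) > 2 else "") + b
--         c = ("......." + chunk[3] if len(chunk) > 3 else "") + c
--         return (a, b, c)
--     a, b, c = go(s[3:])
--     return s[0] + a + "\n" + ".." + s[1] + b + "\n" + "...." + s[2] + c
-- ===== Notes on version B (the rewrite author's own statement) =====
-- stated objective: alternative
-- what changed: Replaces A's single index-dispatching loop (i%4 / i%2 tests updating three mutable strings) by a recursion over the tail s[3:] in blocks of four elements, exploiting the period-4 layout (l2,l1,l2,l3) with no modular arithmetic at all.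
import Mathlib
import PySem

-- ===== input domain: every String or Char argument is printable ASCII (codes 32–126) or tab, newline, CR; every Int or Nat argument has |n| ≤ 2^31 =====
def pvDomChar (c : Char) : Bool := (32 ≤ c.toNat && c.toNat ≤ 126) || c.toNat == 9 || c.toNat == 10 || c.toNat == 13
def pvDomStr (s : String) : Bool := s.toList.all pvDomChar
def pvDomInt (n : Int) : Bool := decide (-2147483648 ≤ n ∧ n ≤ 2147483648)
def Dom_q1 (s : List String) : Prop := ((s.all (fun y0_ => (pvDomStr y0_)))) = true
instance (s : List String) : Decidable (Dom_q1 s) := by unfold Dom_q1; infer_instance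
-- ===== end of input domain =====

-- B replaces A's single index-dispatching loop (i % 4 / i % 2 tests on a triple of
-- mutable strings) by a recursion over the tail s[3:] in blocks of four elements,
-- exploiting the period-4 layout (l2, l1, l2, l3) with no modular arithmetic at all.


-- ===== PORT A =====
-- Literal port of A's loop; pyGetD with default "" is exact because Pre_q1 puts every
-- accessed index in range (indices 0,1,2 and 3 ≤ i < len s).
def q1 (s : List String) : String :=
  let l1 := PySem.List.pyGetD s 0 ""
  let l2 := ".." ++ PySem.List.pyGetD s 1 ""
  let l3 := "...." ++ PySem.List.pyGetD s 2 ""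
  let st := (PySem.List.pyRange 3 (s.length : Int) 1).foldl
    (fun (st : String × String × String) i =>
      if PySem.Int.mod i 4 = 0 then (st.1 ++ "......." ++ PySem.List.pyGetD s i "", st.2.1, st.2.2)
      else if PySem.Int.mod i 2 = 1 then (st.1, st.2.1 ++ "..." ++ PySem.List.pyGetD s i "", st.2.2)
      else if PySem.Int.mod i 2 = 0 then (st.1, st.2.1, st.2.2 ++ "......." ++ PySem.List.pyGetD s i "")
      else st)
    (l1, l2, l3)
  st.1 ++ "\n" ++ st.2.1 ++ "\n" ++ st.2.2

-- ===== PORT B =====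
-- Source B's helper go: recursion over s[3:] in chunks of four; the match cases are
-- Source B's len(chunk) > 1/2/3 tests on a chunk of at most four elements.
def q1go : List String → String × String × String
  | [] => ("", "", "")
  | [b0] => ("", "..." ++ b0, "")
  | [b0, a0] => ("......." ++ a0, "..." ++ b0, "")
  | [b0, a0, b1] => ("......." ++ a0, "..." ++ b0 ++ ("..." ++ b1), "")
  | b0 :: a0 :: b1 :: c0 :: rest =>
      let (a, b, c) := q1go rest
      ("......." ++ a0 ++ a, "..." ++ b0 ++ ("..." ++ b1) ++ b, "......." ++ c0 ++ c)

def q1_alt (s : List String) : String :=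
  let abc := q1go (PySem.List.slice s (some 3) none)
  PySem.List.pyGetD s 0 "" ++ abc.1 ++ "\n" ++
    ".." ++ PySem.List.pyGetD s 1 "" ++ abc.2.1 ++ "\n" ++
    "...." ++ PySem.List.pyGetD s 2 "" ++ abc.2.2

-- ===== PRECONDITION & SPEC =====
-- Pre_q1 excludes only the inputs on which A raises IndexError (fewer than 3 elements).
def Pre_q1 (s : List String) : Prop := 3 ≤ s.length
instance (s : List String) : Decidable (Pre_q1 s) := by unfold Pre_q1; infer_instance
def pvWitness_q1 : List String := ["ab", "cd", "ef", "g", "h"]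
def Spec_q1 (s : List String) (out : String) : Prop := out = q1_alt s
instance (s : List String) (out : String) : Decidable (Spec_q1 s out) := by unfold Spec_q1; infer_instance

-- ===== CLAIM (what is proved, stated in full; the proofs are below) =====
def Claim_equal_q1 : Prop := ∀ (s : List String), Dom_q1 s → Pre_q1 s → Spec_q1 s (q1 s)

-- ===== LEMMAS AND PROOFS =====

theorem pv_nl2 (x : String) : "\n" ++ (".." ++ x) = "\n.." ++ x := by
  rw [← String.append_assoc]; rfl

theorem pv_nl4 (x : String) : "\n" ++ ("...." ++ x) = "\n...." ++ x := by
  rw [← String.append_assoc]; rfl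

theorem pv_getD (s t : List String) (k j : Nat) (h : s.drop k = t) (x : String)
    (hx : t[j]? = some x) : List.getD s (k + j) "" = x := by
  have hd : t[j]? = s[k + j]? := by rw [← h, List.getElem?_drop]
  rw [List.getD_eq_getElem?_getD, ← hd, hx]
  rfl

-- invariant: A's loop from index k (k % 4 = 3) onward extends the triple state by
-- exactly the three suffixes that B's chunk recursion computes from s.drop k
theorem pv_loop (s : List String) (t : List String) :
    ∀ (k : Nat), s.drop k = t → k % 4 = 3 → ∀ a b c : String,
    (PySem.List.pyRange (k : Int) (s.length : Int) 1).foldl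
      (fun (st : String × String × String) i =>
        if PySem.Int.mod i 4 = 0 then (st.1 ++ "......." ++ PySem.List.pyGetD s i "", st.2.1, st.2.2)
        else if PySem.Int.mod i 2 = 1 then (st.1, st.2.1 ++ "..." ++ PySem.List.pyGetD s i "", st.2.2)
        else if PySem.Int.mod i 2 = 0 then (st.1, st.2.1, st.2.2 ++ "......." ++ PySem.List.pyGetD s i "")
        else st)
      (a, b, c)
    = (a ++ (q1go t).1, b ++ (q1go t).2.1, c ++ (q1go t).2.2) := by
  induction t using q1go.induct with
  | case1 =>
    intro k h hk a b c
    have hlen : s.length ≤ k := by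
      have := congrArg List.length h; simp at this; omega
    rw [PySem.List.pyRange_one_eq_nil (by exact_mod_cast hlen)]
    simp [q1go]
  | case2 b0 =>
    intro k h hk a b c
    have hlen : s.length = k + 1 := by
      have := congrArg List.length h; simp at this; omega
    have hr : (s.length : Int) = (k : Int) + 1 := by omega
    have m4 : PySem.Int.mod (k : Int) 4 = 3 := by
      rw [PySem.Int.mod_eq_emod_of_pos (by norm_num)]; omega
    have m2 : PySem.Int.mod (k : Int) 2 = 1 := by
      rw [PySem.Int.mod_eq_emod_of_pos (by norm_num)]; omega
    have e0 : PySem.List.pyGetD s (k : Int) "" = b0 := by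
      rw [PySem.List.pyGetD_natCast]
      exact pv_getD s _ k 0 h b0 rfl
    rw [hr, PySem.List.pyRange_one_singleton]
    simp only [List.foldl_cons, List.foldl_nil]
    simp only [m4, m2, e0]
    norm_num
    simp [q1go, String.append_assoc]
  | case3 b0 a0 =>
    intro k h hk a b c
    have hlen : s.length = k + 2 := by
      have := congrArg List.length h; simp at this; omega
    have hr : (s.length : Int) = (k : Int) + 1 + 1 := by omega
    have m4 : PySem.Int.mod (k : Int) 4 = 3 := by
      rw [PySem.Int.mod_eq_emod_of_pos (by norm_num)]; omega
    have m2 : PySem.Int.mod (k : Int) 2 = 1 := by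
      rw [PySem.Int.mod_eq_emod_of_pos (by norm_num)]; omega
    have m4b : PySem.Int.mod ((k : Int) + 1) 4 = 0 := by
      rw [PySem.Int.mod_eq_emod_of_pos (by norm_num)]; omega
    have e0 : PySem.List.pyGetD s (k : Int) "" = b0 := by
      rw [PySem.List.pyGetD_natCast]; exact pv_getD s _ k 0 h b0 rfl
    have e1 : PySem.List.pyGetD s ((k : Int) + 1) "" = a0 := by
      rw [show (k : Int) + 1 = ((k + 1 : Nat) : Int) by push_cast; ring,
        PySem.List.pyGetD_natCast]
      exact pv_getD s _ k 1 h a0 rfl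
    rw [hr, PySem.List.pyRange_one_cons (by omega), PySem.List.pyRange_one_singleton]
    simp only [List.foldl_cons, List.foldl_nil]
    simp only [m4, m2, m4b, e0, e1]
    norm_num
    simp [q1go, String.append_assoc]
  | case4 b0 a0 b1 =>
    intro k h hk a b c
    have hlen : s.length = k + 3 := by
      have := congrArg List.length h; simp at this; omega
    have hr : (s.length : Int) = (k : Int) + 1 + 1 + 1 := by omega
    have m4 : PySem.Int.mod (k : Int) 4 = 3 := by
      rw [PySem.Int.mod_eq_emod_of_pos (by norm_num)]; omega
    have m2 : PySem.Int.mod (k : Int) 2 = 1 := by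
      rw [PySem.Int.mod_eq_emod_of_pos (by norm_num)]; omega
    have m4b : PySem.Int.mod ((k : Int) + 1) 4 = 0 := by
      rw [PySem.Int.mod_eq_emod_of_pos (by norm_num)]; omega
    have m4c : PySem.Int.mod ((k : Int) + 1 + 1) 4 = 1 := by
      rw [PySem.Int.mod_eq_emod_of_pos (by norm_num)]; omega
    have m2c : PySem.Int.mod ((k : Int) + 1 + 1) 2 = 1 := by
      rw [PySem.Int.mod_eq_emod_of_pos (by norm_num)]; omega
    have e0 : PySem.List.pyGetD s (k : Int) "" = b0 := by
      rw [PySem.List.pyGetD_natCast]; exact pv_getD s _ k 0 h b0 rfl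
    have e1 : PySem.List.pyGetD s ((k : Int) + 1) "" = a0 := by
      rw [show (k : Int) + 1 = ((k + 1 : Nat) : Int) by push_cast; ring,
        PySem.List.pyGetD_natCast]
      exact pv_getD s _ k 1 h a0 rfl
    have e2 : PySem.List.pyGetD s ((k : Int) + 1 + 1) "" = b1 := by
      rw [show (k : Int) + 1 + 1 = ((k + 2 : Nat) : Int) by push_cast; ring,
        PySem.List.pyGetD_natCast]
      exact pv_getD s _ k 2 h b1 rfl
    rw [hr, PySem.List.pyRange_one_cons (by omega), PySem.List.pyRange_one_cons (by omega),
      PySem.List.pyRange_one_singleton]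
    simp only [List.foldl_cons, List.foldl_nil]
    simp only [m4, m2, m4b, m4c, m2c, e0, e1, e2]
    norm_num
    simp [q1go, String.append_assoc]
  | case5 b0 a0 b1 c0 rest pa pb pc hpq ih =>
    intro k h hk a b c
    have hlen : k + 4 ≤ s.length := by
      have := congrArg List.length h; simp at this; omega
    have m4 : PySem.Int.mod (k : Int) 4 = 3 := by
      rw [PySem.Int.mod_eq_emod_of_pos (by norm_num)]; omega
    have m2 : PySem.Int.mod (k : Int) 2 = 1 := by
      rw [PySem.Int.mod_eq_emod_of_pos (by norm_num)]; omega
    have m4b : PySem.Int.mod ((k : Int) + 1) 4 = 0 := by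
      rw [PySem.Int.mod_eq_emod_of_pos (by norm_num)]; omega
    have m4c : PySem.Int.mod ((k : Int) + 1 + 1) 4 = 1 := by
      rw [PySem.Int.mod_eq_emod_of_pos (by norm_num)]; omega
    have m2c : PySem.Int.mod ((k : Int) + 1 + 1) 2 = 1 := by
      rw [PySem.Int.mod_eq_emod_of_pos (by norm_num)]; omega
    have m4d : PySem.Int.mod ((k : Int) + 1 + 1 + 1) 4 = 2 := by
      rw [PySem.Int.mod_eq_emod_of_pos (by norm_num)]; omega
    have m2d : PySem.Int.mod ((k : Int) + 1 + 1 + 1) 2 = 0 := by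
      rw [PySem.Int.mod_eq_emod_of_pos (by norm_num)]; omega
    have e0 : PySem.List.pyGetD s (k : Int) "" = b0 := by
      rw [PySem.List.pyGetD_natCast]; exact pv_getD s _ k 0 h b0 rfl
    have e1 : PySem.List.pyGetD s ((k : Int) + 1) "" = a0 := by
      rw [show (k : Int) + 1 = ((k + 1 : Nat) : Int) by push_cast; ring,
        PySem.List.pyGetD_natCast]
      exact pv_getD s _ k 1 h a0 rfl
    have e2 : PySem.List.pyGetD s ((k : Int) + 1 + 1) "" = b1 := by
      rw [show (k : Int) + 1 + 1 = ((k + 2 : Nat) : Int) by push_cast; ring,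
        PySem.List.pyGetD_natCast]
      exact pv_getD s _ k 2 h b1 rfl
    have e3 : PySem.List.pyGetD s ((k : Int) + 1 + 1 + 1) "" = c0 := by
      rw [show (k : Int) + 1 + 1 + 1 = ((k + 3 : Nat) : Int) by push_cast; ring,
        PySem.List.pyGetD_natCast]
      exact pv_getD s _ k 3 h c0 rfl
    have hdrop : s.drop (k + 4) = rest := by
      rw [← List.drop_drop, h]; rfl
    have key := ih (k + 4) hdrop (by omega) (a ++ "......." ++ a0)
      (b ++ "..." ++ b0 ++ "..." ++ b1) (c ++ "......." ++ c0)
    rw [PySem.List.pyRange_one_append (k : Int) ((k : Int) + 4) (s.length : Int)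
      (by omega) (by omega), List.foldl_append,
      PySem.List.pyRange_one_cons (show (k : Int) < (k : Int) + 4 by omega),
      PySem.List.pyRange_one_cons (show (k : Int) + 1 < (k : Int) + 4 by omega),
      PySem.List.pyRange_one_cons (show (k : Int) + 1 + 1 < (k : Int) + 4 by omega)]
    rw [PySem.List.pyRange_one_cons (show (k : Int) + 1 + 1 + 1 < (k : Int) + 4 by omega)]
    rw [show (k : Int) + 1 + 1 + 1 + 1 = (k : Int) + 4 by ring,
      PySem.List.pyRange_one_eq_nil (le_refl ((k : Int) + 4))]
    simp only [List.foldl_cons, List.foldl_nil]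
    simp only [m4, m2, m4b, m4c, m2c, m4d, m2d, e0, e1, e2, e3]
    norm_num
    norm_num at key
    rw [key]
    simp [q1go, String.append_assoc]

-- ===== VERDICT (by name: the statement is the Claim_ definition above) =====
theorem q1_spec : Claim_equal_q1 := by
  intro s _ hp
  unfold Spec_q1 q1 q1_alt
  have key := pv_loop s (s.drop 3) 3 rfl (by norm_num)
  push_cast at key
  have hs : PySem.List.slice s (some 3) none = s.drop 3 := by
    have := PySem.List.slice_from (xs := s) (a := 3) (by norm_num)
    simpa using this
  simp only [hs, key]
  simp [String.append_assoc, pv_nl2, pv_nl4]
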